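-- pv_equiv track=rewrite | github.com/ViniGuimaraes/Mathematics | Mistos/Determinação de ternas pitagóricas por um dos catetos ou pela hipotenusa.py | triangular
-- ===== SOURCE A (Python) =====
-- def triangular(c):
--     a = 0
--     i = 1
--     n = 0
--     while 5+4*(i-1)<=c:
--         if 5+4*(i-1) == c:
--             a = True
--             break
--         i+=1
--     if a == True:
--         for n in range(1, i+1):
--             if i == (n**2+n)/2:
--                 return True
--         return False
--     else:
--         return False
-- ===== SOURCE B (Python) =====
-- def triangular(c):
--     # c must be 4*i + 1 with i >= 1, and i a triangular number.
--     if c < 5 or c % 4 != 1: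
--         return False
--     i = (c - 1) // 4
--     m = 8 * i + 1          # i is triangular iff 8*i+1 is a perfect square
--     x = m                  # Newton's integer square root
--     y = (x + m // x) // 2
--     while y < x:
--         x = y
--         y = (x + m // x) // 2
--     return x * x == m
-- ===== Notes on version B (the rewrite author's own statement) =====
-- stated objective: faster
-- what changed: Replaces A's linear scan for i with c=4i+1 and its second linear scan for a triangular-number witness by a constant-time modular check plus a Newton integer-square-root test of 8i+1.
import Mathlib
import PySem

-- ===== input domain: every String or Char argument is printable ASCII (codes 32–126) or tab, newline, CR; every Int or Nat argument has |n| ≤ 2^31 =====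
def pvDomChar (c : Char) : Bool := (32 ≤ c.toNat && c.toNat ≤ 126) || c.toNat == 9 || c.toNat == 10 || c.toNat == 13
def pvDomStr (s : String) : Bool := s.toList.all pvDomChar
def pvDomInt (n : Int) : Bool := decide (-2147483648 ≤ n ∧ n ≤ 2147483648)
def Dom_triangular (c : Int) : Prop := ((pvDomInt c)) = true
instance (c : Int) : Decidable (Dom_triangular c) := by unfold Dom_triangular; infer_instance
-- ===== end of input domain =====

-- B replaces A's two linear scans (for i with c = 4i+1, then for a triangular witness n)
-- by a modular check plus a Newton integer-square-root test of 8i+1 (objective: faster).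


-- ===== PORT A =====
-- A's while loop: i counts up from 1 while 5+4*(i-1) <= c; 'some i' = the break with a=True
def triFind (c i : Int) : Option Int :=
  if 5 + 4 * (i - 1) ≤ c then
    if 5 + 4 * (i - 1) = c then some i
    else triFind c (i + 1)
  else none
termination_by (c + 1 - (5 + 4 * (i - 1))).toNat
decreasing_by omega

def triangular (c : Int) : Bool :=
  match triFind c 1 with
  | some i =>
      -- 'i == (n**2+n)/2': comparing the int i with the float (n**2+n)/2 is exact as the
      -- integer equation n*n+n = 2*i on the admitted domain |c| ≤ 2^31
      (PySem.List.pyRange 1 (i + 1) 1).any (fun n => decide (n * n + n = 2 * i))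
  | none => false

-- ===== PORT B =====
-- Newton integer-square-root loop of Source B; the '0 < x' test is a totality guard only
-- (the Python loop always has x > 0, since x starts at m ≥ 41 there)
def isqrtLoop (m x : Int) : Int :=
  if _h : 0 < x then
    let y := PySem.Int.floordiv (x + PySem.Int.floordiv m x) 2
    if y < x then isqrtLoop m y else x
  else x
termination_by x.toNat
decreasing_by omega

def triangular_alt (c : Int) : Bool :=
  if c < 5 || !(PySem.Int.mod c 4 == 1) then false
  else
    let i := PySem.Int.floordiv (c - 1) 4
    let m := 8 * i + 1
    let x := isqrtLoop m m
    decide (x * x = m)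

-- ===== PRECONDITION & SPEC =====
def Spec_triangular (c : Int) (out : Bool) : Prop := out = triangular_alt c
instance (c : Int) (out : Bool) : Decidable (Spec_triangular c out) := by unfold Spec_triangular; infer_instance

-- ===== CLAIM (what is proved, stated in full; the proofs are below) =====
def Claim_equal_triangular : Prop := ∀ (c : Int), Dom_triangular c → Spec_triangular c (triangular c)

-- ===== LEMMAS AND PROOFS =====

-- A's while loop finds some i (namely (c-1)/4) exactly when c ≥ 4*i0+1 and c ≡ 1 (mod 4)
lemma triFind_some (c : Int) (h2 : c % 4 = 1) :
    ∀ i0, 4 * i0 + 1 ≤ c → triFind c i0 = some ((c - 1) / 4) := by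
  intro i0
  fun_induction triFind c i0 with
  | case1 i h hi => intro _; simp; omega
  | case2 i h hne ih => intro h1; exact ih (by omega)
  | case3 i h => intro h1; omega

lemma triFind_none (c : Int) : ∀ i0, c < 4 * i0 + 1 ∨ c % 4 ≠ 1 → triFind c i0 = none := by
  intro i0
  fun_induction triFind c i0 with
  | case1 i h hi => intro h1; omega
  | case2 i h hne ih => intro h1; exact ih (by omega)
  | case3 i h => intro _; rfl

lemma sqrt_sq_le (m : Int) (hm : 0 < m) :
    (Nat.sqrt m.toNat : Int) * (Nat.sqrt m.toNat : Int) ≤ m := by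
  have h2 : ((Nat.sqrt m.toNat * Nat.sqrt m.toNat : Nat) : Int) ≤ ((m.toNat : Nat) : Int) := by
    have := Nat.sqrt_le m.toNat
    exact_mod_cast this
  push_cast at h2
  omega

lemma lt_succ_sqrt_sq (m : Int) (hm : 0 < m) :
    m < ((Nat.sqrt m.toNat : Int) + 1) * ((Nat.sqrt m.toNat : Int) + 1) := by
  have h2 : ((m.toNat : Nat) : Int) < (((Nat.sqrt m.toNat + 1) * (Nat.sqrt m.toNat + 1) : Nat) : Int) := by
    have := Nat.lt_succ_sqrt m.toNat
    exact_mod_cast this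
  push_cast at h2
  omega

-- a Newton step from any positive x never undershoots the integer square root
lemma newton_step_ge_sqrt (m x : Int) (hm : 0 < m) (hx : 0 < x) :
    (Nat.sqrt m.toNat : Int) ≤ PySem.Int.floordiv (x + PySem.Int.floordiv m x) 2 := by
  set S : Int := (Nat.sqrt m.toNat : Int) with hSdef
  have hSS : S * S ≤ m := sqrt_sq_le m hm
  rw [PySem.Int.le_floordiv_iff_mul_le (by norm_num : (0:Int) < 2)]
  have hq0 : (0:Int) ≤ PySem.Int.floordiv m x :=
    (PySem.Int.le_floordiv_iff_mul_le hx).mpr (by nlinarith)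
  by_cases hcase : 2 * S - x ≤ 0
  · omega
  · have : 2 * S - x ≤ PySem.Int.floordiv m x := by
      rw [PySem.Int.le_floordiv_iff_mul_le hx]
      nlinarith [sq_nonneg (S - x)]
    omega

lemma isqrtLoop_eq (m : Int) (hm : 0 < m) :
    ∀ x : Int, 0 < x → (Nat.sqrt m.toNat : Int) ≤ x →
    isqrtLoop m x = (Nat.sqrt m.toNat : Int) := by
  intro x
  have hSpos : 0 < (Nat.sqrt m.toNat : Int) := by
    have : 0 < Nat.sqrt m.toNat := Nat.sqrt_pos.mpr (by omega)
    exact_mod_cast this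
  fun_induction isqrtLoop m x with
  | case1 x hx y hlt ih =>
      intro _ _
      exact ih (by have := newton_step_ge_sqrt m x hm hx; omega)
        (newton_step_ge_sqrt m x hm hx)
  | case2 x hx y hnlt =>
      intro _ hge
      have hxy : x ≤ y := by omega
      have h1 : x * 2 ≤ x + PySem.Int.floordiv m x := by
        rw [← PySem.Int.le_floordiv_iff_mul_le (by norm_num : (0:Int) < 2)]; exact hxy
      have h2 : x * x ≤ m := by
        have hle : x ≤ PySem.Int.floordiv m x := by omega
        rw [PySem.Int.le_floordiv_iff_mul_le hx] at hle; exact hle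
      have h3 := lt_succ_sqrt_sq m hm
      by_contra hne
      have hgt : (Nat.sqrt m.toNat : Int) + 1 ≤ x := by omega
      nlinarith
  | case3 x hx => intro h0; omega

lemma triangular_eq_alt (c : Int) : triangular c = triangular_alt c := by
  by_cases hbad : c < 5 ∨ c % 4 ≠ 1
  · have hA : triFind c 1 = none := triFind_none c 1 (by omega)
    have hBf : triangular_alt c = false := by
      rw [triangular_alt, PySem.Int.mod_eq_emod_of_pos (by norm_num : (0:Int) < 4)]
      rcases hbad with h | h <;> simp [h]
    simp [triangular, hA, hBf]
  · have hc5 : 5 ≤ c := by omega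
    have hcmod : c % 4 = 1 := by omega
    have hA : triFind c 1 = some ((c - 1) / 4) := triFind_some c hcmod 1 (by omega)
    set i : Int := (c - 1) / 4 with hi
    have hi1 : 1 ≤ i := by omega
    set m : Int := 8 * i + 1 with hmdef
    have hm : 0 < m := by omega
    set S : Int := (Nat.sqrt m.toNat : Int) with hS
    have hB : triangular_alt c = decide (S * S = m) := by
      have hcond : (decide (c < 5) || !(PySem.Int.mod c 4 == 1)) = false := by
        rw [PySem.Int.mod_eq_emod_of_pos (by norm_num : (0:Int) < 4)]
        simp [hcmod]; omega
      have hfd : PySem.Int.floordiv (c - 1) 4 = i := by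
        rw [PySem.Int.floordiv_eq_ediv_of_pos (by norm_num : (0:Int) < 4)]
      have hloop : isqrtLoop m m = S := by
        refine isqrtLoop_eq m hm m (by omega) ?_
        have h2 : ((Nat.sqrt m.toNat : Nat) : Int) ≤ ((m.toNat : Nat) : Int) := by
          exact_mod_cast Nat.sqrt_le_self m.toNat
        omega
      simp only [triangular_alt, hcond, Bool.false_eq_true, if_false, hfd, ← hmdef, hloop]
    have hSnn : 0 ≤ S := by rw [hS]; positivity
    rw [hB, triangular, hA]
    rw [Bool.eq_iff_iff]
    simp only [List.any_eq_true, PySem.List.mem_pyRange_one, decide_eq_true_eq]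
    constructor
    · rintro ⟨n, ⟨h1n, hni⟩, heq⟩
      have hk : m = (2 * n + 1) * (2 * n + 1) := by rw [hmdef]; linear_combination (-4 : Int) * heq
      have hk1 : (((2 * n + 1).toNat : Nat) : Int) = 2 * n + 1 := by omega
      have hk2 : (((2 * n + 1).toNat * (2 * n + 1).toNat : Nat) : Int) = m := by
        push_cast; rw [hk1, hk]
      have hkn : m.toNat = (2 * n + 1).toNat * (2 * n + 1).toNat := by omega
      have hsq : Nat.sqrt m.toNat = (2 * n + 1).toNat := by
        rw [hkn, ← pow_two]; exact Nat.sqrt_eq' _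
      rw [hS, hsq, hk1, hk]
    · intro hsq
      have hS3 : 3 ≤ S := by nlinarith [hsq, hSnn, hi1]
      have hodd : S % 2 = 1 := by
        by_contra h
        obtain ⟨k, hk⟩ : ∃ k, S = 2 * k := ⟨S / 2, by omega⟩
        rw [hk, hmdef] at hsq
        have h4 : 4 * (k * k) = 8 * i + 1 := by linear_combination hsq
        omega
      set n : Int := (S - 1) / 2 with hn
      have hSn : S = 2 * n + 1 := by omega
      rw [hSn, hmdef] at hsq
      have h4 : 4 * (n * n + n - 2 * i) = 0 := by linear_combination hsq
      have htr : n * n + n = 2 * i := by linarith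
      have hn1 : 1 ≤ n := by omega
      have hnn : n ≤ n * n := by nlinarith
      exact ⟨n, ⟨hn1, by linarith⟩, htr⟩

-- ===== VERDICT (by name: the statement is the Claim_ definition above) =====
theorem triangular_spec : Claim_equal_triangular := by
  intro c _
  unfold Spec_triangular
  exact triangular_eq_alt c
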